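-- pv_equiv track=rewrite | github.com/thomas475/Robot-Learning-from-Diverse-Human-Feedback | Clean-Offline-RLHF/rlhf/utils.py | get_episode_boundaries
-- ===== SOURCE A (Python) =====
-- def get_episode_boundaries(dones):
--     episode_boundaries = []
--     start = 0
--     for i in range(len(dones)):
--         if dones[i] == 1 or i == (len(dones) - 1):
--             episode_boundaries.append((start, i))
--             start = i + 1
--     return episode_boundaries
-- ===== SOURCE B (Python) =====
-- def get_episode_boundaries(dones):
--     ends = [i for i, d in enumerate(dones) if d == 1]
--     if dones and (not ends or ends[-1] != len(dones) - 1):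
--         ends.append(len(dones) - 1)
--     starts = [0] + [e + 1 for e in ends[:-1]]
--     return list(zip(starts, ends))
-- ===== Notes on version B (the rewrite author's own statement) =====
-- stated objective: alternative
-- what changed: B first builds the table of episode end indices by filtering enumerate (forcing the final index as an end), then derives the start of each episode by shifting that table and zips, instead of A's single loop threading a mutable running start.
import Mathlib
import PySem

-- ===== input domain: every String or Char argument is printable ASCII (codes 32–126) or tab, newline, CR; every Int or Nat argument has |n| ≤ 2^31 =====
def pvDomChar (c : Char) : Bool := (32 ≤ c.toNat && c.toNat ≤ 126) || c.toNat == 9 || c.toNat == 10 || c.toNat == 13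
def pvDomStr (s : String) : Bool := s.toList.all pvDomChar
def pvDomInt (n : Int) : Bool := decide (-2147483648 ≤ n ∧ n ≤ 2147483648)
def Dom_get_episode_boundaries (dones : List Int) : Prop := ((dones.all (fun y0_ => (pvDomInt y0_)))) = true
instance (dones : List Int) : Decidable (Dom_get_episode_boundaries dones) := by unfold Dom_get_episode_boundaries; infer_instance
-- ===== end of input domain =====

-- B builds the end-index table first and derives starts by shifting it (a two-pass
-- decomposition), instead of A's single loop with a mutable running start. Same cost.

-- ===== PORT A =====
-- literal port of A: loop i over range(len(dones)), state = (episode_boundaries, start)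
def get_episode_boundaries (dones : List Int) : List (Int × Int) :=
  ((PySem.List.pyRange 0 (dones.length : Int) 1).foldl
    (fun (st : List (Int × Int) × Int) i =>
      if PySem.List.pyGetD dones i 0 = 1 ∨ i = (dones.length : Int) - 1 then
        (st.1 ++ [(st.2, i)], i + 1)
      else st)
    ([], 0)).1

-- ===== PORT B =====
-- literal port of Source B: ends via enumerate-filter, forced last end, starts := [0] ++ shifted ends[:-1], zip
def get_episode_boundaries_alt (dones : List Int) : List (Int × Int) :=
  let ends0 := (PySem.List.enumerate dones).filterMap
    (fun p => if p.2 = 1 then some p.1 else none)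
  let ends := if dones ≠ [] ∧ (ends0 = [] ∨ ends0.getLast? ≠ some ((dones.length : Int) - 1)) then
      ends0 ++ [(dones.length : Int) - 1]
    else ends0
  let starts := 0 :: ends.dropLast.map (· + 1)
  starts.zip ends

-- ===== PRECONDITION & SPEC =====
def Spec_get_episode_boundaries (dones : List Int) (out : List (Int × Int)) : Prop := out = get_episode_boundaries_alt dones
instance (dones : List Int) (out : List (Int × Int)) : Decidable (Spec_get_episode_boundaries dones out) := by unfold Spec_get_episode_boundaries; infer_instance

-- ===== CLAIM (what is proved, stated in full; the proofs are below) =====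
def Claim_equal_get_episode_boundaries : Prop := ∀ (dones : List Int), Dom_get_episode_boundaries dones → Spec_get_episode_boundaries dones (get_episode_boundaries dones)

-- ===== LEMMAS AND PROOFS =====

-- A's loop as structural recursion over the list (i = current index, start = running start)
def fA (i start : Int) : List Int → List (Int × Int)
  | [] => []
  | d :: rest =>
    if d = 1 ∨ rest = [] then (start, i) :: fA (i + 1) (i + 1) rest
    else fA (i + 1) start rest

-- the end-index table (with the final index forced), as structural recursion
def gE (i : Int) : List Int → List Int
  | [] => []
  | d :: rest =>
    if rest = [] then [i]
    else if d = 1 then i :: gE (i + 1) rest else gE (i + 1) rest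

-- B's filtered index list
def eF (i : Int) (l : List Int) : List Int :=
  (PySem.List.enumerate l i).filterMap (fun p => if p.2 = 1 then some p.1 else none)

theorem eF_nil (i : Int) : eF i [] = [] := by
  simp [eF, PySem.List.enumerate_nil]

theorem eF_cons (i : Int) (d : Int) (rest : List Int) :
    eF i (d :: rest) = (if d = 1 then [i] else []) ++ eF (i + 1) rest := by
  simp only [eF, PySem.List.enumerate_cons, List.filterMap_cons]
  split_ifs <;> simp

theorem gE_ne_nil (i : Int) (l : List Int) (h : l ≠ []) : gE i l ≠ [] := by
  induction l generalizing i with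
  | nil => exact absurd rfl h
  | cons d rest ih =>
    simp only [gE]
    split_ifs with h1 h2 <;> simp_all

-- B's conditional append equals the forced table gE
theorem gE_eq_eF (l : List Int) (i : Int) (h : l ≠ []) :
    gE i l =
      if (eF i l).getLast? = some (i + l.length - 1) then eF i l
      else eF i l ++ [i + l.length - 1] := by
  induction l generalizing i with
  | nil => exact absurd rfl h
  | cons d rest ih =>
    have ht : i + ((d :: rest).length : Int) - 1 = (i + 1) + (rest.length : Int) - 1 := by
      push_cast [List.length_cons]; ring
    rw [eF_cons, ht]
    by_cases hr : rest = []
    · subst hr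
      by_cases hd : d = 1 <;> simp [gE, eF_nil, hd]
    · have hlen1 : (1 : Int) ≤ (rest.length : Int) := by
        have := List.length_pos_iff.mpr hr; omega
      have ih' := ih (i + 1) hr
      by_cases hd : d = 1
      · by_cases hE : eF (i + 1) rest = []
        · have hne : some i ≠ some ((i + 1) + (rest.length : Int) - 1) := by
            intro hc; injection hc with hc; omega
          simp [gE, hr, hd, hE, hne, ih']
        · subst hd
          obtain ⟨e, E'', hEeq⟩ := List.exists_cons_of_ne_nil hE
          simp only [gE, if_neg hr, ih', hEeq]
          split_ifs <;> simp_all [List.getLast?_cons_cons]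
      · simp [gE, hr, hd, ih']

-- A's recursion equals B's zip-of-shifted-table shape
theorem fA_eq_zip (l : List Int) (i start : Int) :
    fA i start l = ((start :: (gE i l).dropLast.map (· + 1)).zip (gE i l)) := by
  induction l generalizing i start with
  | nil => simp [fA, gE]
  | cons d rest ih =>
    by_cases hr : rest = []
    · simp [fA, gE, hr]
    · obtain ⟨e, g', hge⟩ := List.exists_cons_of_ne_nil (gE_ne_nil (i + 1) rest hr)
      by_cases hd : d = 1
      · simp [fA, gE, hr, hd, ih, hge]
      · simp [fA, gE, hr, hd, ih]

-- A's fold equals fA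
theorem foldA (rest pre : List Int) (start : Int) (acc : List (Int × Int)) :
    ((PySem.List.pyRange (pre.length : Int) ((pre ++ rest).length : Int) 1).foldl
      (fun (st : List (Int × Int) × Int) i =>
        if PySem.List.pyGetD (pre ++ rest) i 0 = 1 ∨ i = ((pre ++ rest).length : Int) - 1 then
          (st.1 ++ [(st.2, i)], i + 1)
        else st)
      (acc, start)).1 = acc ++ fA (pre.length : Int) start rest := by
  induction rest generalizing pre start acc with
  | nil =>
    rw [PySem.List.pyRange_one_eq_nil (by simp)]
    simp [fA]
  | cons d rest' ih =>
    have hL : ((pre ++ d :: rest').length : Int) = (pre.length : Int) + (rest'.length : Int) + 1 := by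
      push_cast [List.length_append, List.length_cons]; ring
    have hlt : ((pre.length : Int)) < ((pre ++ d :: rest').length : Int) := by
      rw [hL]; omega
    rw [PySem.List.pyRange_one_cons hlt]
    rw [List.foldl_cons]
    have hget : PySem.List.pyGetD (pre ++ d :: rest') (pre.length : Int) 0 = d := by
      simp [List.getD]
    have hcond : ((pre.length : Int) = ((pre ++ d :: rest').length : Int) - 1) ↔ rest' = [] := by
      rw [hL]
      constructor
      · intro h
        have : rest'.length = 0 := by omega
        exact List.length_eq_zero_iff.mp this
      · intro h; subst h; simp
    have happ : pre ++ d :: rest' = (pre ++ [d]) ++ rest' := by simp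
    have hlen : ((pre.length : Int)) + 1 = (((pre ++ [d]).length : Int)) := by simp
    by_cases hc : d = 1 ∨ rest' = []
    · rw [if_pos (by rw [hget, hcond]; exact hc)]
      have hfa : fA (pre.length : Int) start (d :: rest') =
          (start, (pre.length : Int)) :: fA ((pre.length : Int) + 1) ((pre.length : Int) + 1) rest' := by
        simp only [fA]; rw [if_pos hc]
      dsimp only
      rw [hfa,
        show acc ++ ((start, (pre.length : Int)) ::
            fA ((pre.length : Int) + 1) ((pre.length : Int) + 1) rest') =
          (acc ++ [(start, (pre.length : Int))]) ++
            fA ((pre.length : Int) + 1) ((pre.length : Int) + 1) rest' from by simp]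
      rw [happ, hlen]
      exact ih (pre ++ [d]) _ _
    · rw [if_neg (by rw [hget, hcond]; exact hc)]
      have hfa : fA (pre.length : Int) start (d :: rest') = fA ((pre.length : Int) + 1) start rest' := by
        simp only [fA]; rw [if_neg hc]
      rw [hfa, happ, hlen]
      exact ih (pre ++ [d]) _ _

-- ===== VERDICT (by name: the statement is the Claim_ definition above) =====
theorem get_episode_boundaries_spec : Claim_equal_get_episode_boundaries := by
  intro dones _
  unfold Spec_get_episode_boundaries
  have hA : get_episode_boundaries dones = fA 0 0 dones := by
    have h := foldA dones [] 0 []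
    simpa [get_episode_boundaries] using h
  rw [hA]
  cases dones with
  | nil => decide
  | cons d rest =>
    have hne : (d :: rest : List Int) ≠ [] := List.cons_ne_nil d rest
    have hE := gE_eq_eF (d :: rest) 0 hne
    rw [show (0 : Int) + ((d :: rest).length : Int) - 1 = ((d :: rest).length : Int) - 1 from by
      ring] at hE
    have hends0 : (PySem.List.enumerate (d :: rest)).filterMap
        (fun p => if p.2 = 1 then some p.1 else none) = eF 0 (d :: rest) := rfl
    rw [fA_eq_zip]
    simp only [get_episode_boundaries_alt, hends0]
    by_cases hlast : (eF 0 (d :: rest)).getLast? = some (((d :: rest).length : Int) - 1)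
    · rw [if_pos hlast] at hE
      have hcond : ¬ ((d :: rest : List Int) ≠ [] ∧ (eF 0 (d :: rest) = [] ∨
          (eF 0 (d :: rest)).getLast? ≠ some (((d :: rest).length : Int) - 1))) := by
        push Not
        intro _
        refine ⟨?_, hlast⟩
        intro hnil
        rw [hnil] at hlast
        simp at hlast
      rw [if_neg hcond, hE]
    · rw [if_neg hlast] at hE
      have hcond : ((d :: rest : List Int) ≠ [] ∧ (eF 0 (d :: rest) = [] ∨
          (eF 0 (d :: rest)).getLast? ≠ some (((d :: rest).length : Int) - 1))) :=
        ⟨hne, Or.inr hlast⟩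
      rw [if_pos hcond, hE]
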